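-- pv_equiv track=rewrite | github.com/cipherxsniper/omega | omega_init_system.py | deduplicate_services
-- ===== SOURCE A (Python) =====
-- from collections import defaultdict
--
-- def extract_base(name):
--     """
--     omega_kernel_v47.py -> omega_kernel
--     """
--     if "_v" in name:
--         return name.split("_v")[0]
--     return name.replace(".py", "")
--
-- def extract_version(name):
--     try:
--         if "_v" in name:
--             part = name.split("_v")[-1]
--             return int(part.split(".")[0])
--     except:
--         pass
--     return 0
--
-- def deduplicate_services(services):
--     grouped = defaultdict(list)
--
--     for s in services:
--         base = extract_base(s)
--         grouped[base].append(s)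
--
--     selected = []
--
--     for base, items in grouped.items():
--         best = max(items, key=extract_version)
--         selected.append(best)
--
--     return selected
-- ===== SOURCE B (Python) =====
-- def extract_base(name):
--     if "_v" in name:
--         return name.split("_v")[0]
--     return name.replace(".py", "")
--
-- def extract_version(name):
--     try:
--         if "_v" in name:
--             part = name.split("_v")[-1]
--             return int(part.split(".")[0])
--     except:
--         pass
--     return 0
--
-- def deduplicate_services(services):
--     best = {}
--     for s in services:
--         base = extract_base(s)
--         cur = best.get(base)
--         if cur is None or extract_version(s) > extract_version(cur):
--             best[base] = s
--     return list(best.values())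
-- ===== Notes on version B (the rewrite author's own statement) =====
-- stated objective: simpler
-- what changed: Replaces the dict-of-lists grouping plus a per-group max() pass with a single pass keeping one running-best service per base name (strict > preserves max's first-occurrence tie-break).
import Mathlib
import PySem

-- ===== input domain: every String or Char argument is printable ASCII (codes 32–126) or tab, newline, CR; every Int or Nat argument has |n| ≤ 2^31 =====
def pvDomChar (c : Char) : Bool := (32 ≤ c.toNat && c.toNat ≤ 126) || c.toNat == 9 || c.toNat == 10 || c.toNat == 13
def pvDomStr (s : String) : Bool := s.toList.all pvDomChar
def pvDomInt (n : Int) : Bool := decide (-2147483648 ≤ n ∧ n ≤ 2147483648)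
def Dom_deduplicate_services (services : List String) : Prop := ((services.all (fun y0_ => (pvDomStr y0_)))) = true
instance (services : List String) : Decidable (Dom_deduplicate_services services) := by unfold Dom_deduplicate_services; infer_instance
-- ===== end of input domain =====

-- B replaces the group-everything-then-max pass by a single pass keeping one running-best
-- service per base name (simpler: one dict of winners instead of a dict of lists plus max()).

-- ===== PORT A =====
-- shared module helper: extract_base (exact port; split/replace via PySem)
def pyExtractBase (name : String) : String :=
  if PySem.Str.isIn "_v" name then
    ((PySem.Str.split? name "_v").getD []).headD ""   -- split always nonempty; [0]
  else
    PySem.Str.replace name ".py" ""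

-- shared module helper: extract_version (the try only guards int(); ValueError -> 0)
def pyExtractVersion (name : String) : Int :=
  if PySem.Str.isIn "_v" name then
    let part := ((PySem.Str.split? name "_v").getD []).getLastD ""   -- [-1]
    match PySem.Int.ofStr? (((PySem.Str.split? part ".").getD []).headD "") with
    | some v => v
    | none => 0
  else 0

def deduplicate_services (services : List String) : List String :=
  let grouped : PySem.Dict String (List String) :=
    services.foldl (fun d s =>
      let base := pyExtractBase s
      d.insert base (d.getD base [] ++ [s])) PySem.Dict.empty
  grouped.items.foldl
    (fun sel p => sel ++ [(PySem.List.max? p.2 pyExtractVersion).getD ""]) []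

-- ===== PORT B =====
def deduplicate_services_alt (services : List String) : List String :=
  (services.foldl (fun best s =>
      let base := pyExtractBase s
      match best.get? base with
      | none => best.insert base s
      | some cur =>
          if pyExtractVersion cur < pyExtractVersion s then best.insert base s else best)
    (PySem.Dict.empty : PySem.Dict String String)).values

-- ===== PRECONDITION & SPEC =====
def Spec_deduplicate_services (services : List String) (out : List String) : Prop := out = deduplicate_services_alt services
instance (services : List String) (out : List String) : Decidable (Spec_deduplicate_services services out) := by unfold Spec_deduplicate_services; infer_instance

-- ===== CLAIM (what is proved, stated in full; the proofs are below) =====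
def Claim_equal_deduplicate_services : Prop := ∀ (services : List String), Dom_deduplicate_services services → Spec_deduplicate_services services (deduplicate_services services)

-- ===== LEMMAS AND PROOFS =====

-- best-of-a-group as A computes it
def pvBest (L : List String) : String := (PySem.List.max? L pyExtractVersion).getD ""

def pvF (p : String × List String) : String × String := (p.1, pvBest p.2)

-- A's fold body / B's fold body, named for the proofs
def pvAf (d : PySem.Dict String (List String)) (s : String) : PySem.Dict String (List String) :=
  let base := pyExtractBase s
  d.insert base (d.getD base [] ++ [s])

def pvBf (b : PySem.Dict String String) (s : String) : PySem.Dict String String :=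
  let base := pyExtractBase s
  match b.get? base with
  | none => b.insert base s
  | some cur =>
      if pyExtractVersion cur < pyExtractVersion s then b.insert base s else b

def pvInv (d : PySem.Dict String (List String)) (b : PySem.Dict String String) : Prop :=
  b.items = d.items.map pvF ∧ (∀ p ∈ d.items, p.2 ≠ []) ∧ d.keys.Nodup

lemma pv_get?_map (l : List (String × List String)) (k : String) :
    (PySem.Dict.mk (l.map pvF) : PySem.Dict String String).get? k
      = ((PySem.Dict.mk l : PySem.Dict String (List String)).get? k).map pvBest := by
  induction l with
  | nil => rfl
  | cons p t ih =>
      obtain ⟨pk, pv⟩ := p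
      simp only [List.map_cons, pvF, PySem.Dict.get?_mk_cons]
      by_cases h : pk == k
      · simp [h]
      · simp [h, ih]

lemma pv_max_append (L : List String) (s mv : String)
    (h : PySem.List.max? L pyExtractVersion = some mv) :
    PySem.List.max? (L ++ [s]) pyExtractVersion
      = some (if pyExtractVersion mv < pyExtractVersion s then s else mv) := by
  unfold PySem.List.max? at h ⊢
  rw [List.foldl_append, h]
  simp only [List.foldl]
  split <;> rfl

lemma pv_best_append (L : List String) (s : String) (hL : L ≠ []) :
    pvBest (L ++ [s])
      = if pyExtractVersion (pvBest L) < pyExtractVersion s then s else pvBest L := by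
  obtain ⟨mv, hmv⟩ : ∃ mv, PySem.List.max? L pyExtractVersion = some mv := by
    cases hmx : PySem.List.max? L pyExtractVersion with
    | none =>
        rw [PySem.List.max?_eq_none_iff] at hmx
        exact absurd hmx hL
    | some m => exact ⟨m, rfl⟩
  unfold pvBest
  rw [pv_max_append L s mv hmv, hmv]
  simp

lemma pv_inv_step (d : PySem.Dict String (List String)) (b : PySem.Dict String String)
    (s : String) (h : pvInv d b) : pvInv (pvAf d s) (pvBf b s) := by
  obtain ⟨hitems, hne, hnd⟩ := h
  have hb : b = PySem.Dict.mk (d.items.map pvF) := PySem.Dict.ext hitems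
  subst hb
  set base := pyExtractBase s with hbase
  have hget : (PySem.Dict.mk (d.items.map pvF) : PySem.Dict String String).get? base
      = (d.get? base).map pvBest := pv_get?_map d.items base
  by_cases hc : d.contains base
  · -- base already grouped
    obtain ⟨L, hL⟩ : ∃ L, d.get? base = some L := by
      rw [PySem.Dict.contains_eq_isSome_get?] at hc
      cases hdg : d.get? base with
      | none => rw [hdg] at hc; simp at hc
      | some L => exact ⟨L, rfl⟩
    have hLmem : (base, L) ∈ d.items := PySem.Dict.mem_items_of_get?_eq_some _ hL
    have hLne : L ≠ [] := hne _ hLmem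
    have hgetD : d.getD base [] = L := by simp [PySem.Dict.getD, hL]
    have hbc : (PySem.Dict.mk (d.items.map pvF) : PySem.Dict String String).contains base := by
      rw [PySem.Dict.contains_eq_isSome_get?, hget, hL]; rfl
    -- the unique entry at key base
    have huniq : ∀ p ∈ d.items, p.1 = base → p.2 = L := by
      intro p hp hpk
      have := PySem.Dict.get?_of_mem_items (d := d) (k := p.1) (v := p.2) hp hnd
      rw [hpk, hL] at this
      exact (Option.some_inj.mp this).symm
    have hAitems : (pvAf d s).items
        = d.items.map (fun p => if p.1 == base then (base, L ++ [s]) else p) := by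
      simp [pvAf, ← hbase, hgetD, PySem.Dict.items_insert, hc]
    constructor
    · -- items relation
      rw [hAitems]
      simp only [pvBf, ← hbase, hget, hL, Option.map_some]
      by_cases hv : pyExtractVersion (pvBest L) < pyExtractVersion s
      · rw [if_pos hv, PySem.Dict.items_insert, if_pos hbc]
        show (List.map pvF d.items).map _ = _
        rw [List.map_map, List.map_map]
        apply List.map_congr_left
        intro p hp
        by_cases hpk : p.1 = base
        · have h2 := huniq p hp hpk
          simp [pvF, hpk, hv, h2, pv_best_append L s hLne]
        · simp [pvF, hpk]
      · rw [if_neg hv]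
        show List.map pvF d.items = _
        rw [List.map_map]
        apply List.map_congr_left
        intro p hp
        by_cases hpk : p.1 = base
        · have h2 := huniq p hp hpk
          simp [pvF, hpk, hv, h2, pv_best_append L s hLne]
        · simp [pvF, hpk]
    constructor
    · -- nonempty values
      intro p hp
      rw [hAitems] at hp
      obtain ⟨q, hq, hqp⟩ := List.mem_map.mp hp
      by_cases hpk : q.1 == base
      · rw [if_pos hpk] at hqp; subst hqp; simp
      · rw [if_neg hpk] at hqp; subst hqp; exact hne _ hq
    · -- keys nodup: keys unchanged
      have : (pvAf d s).keys = d.keys := by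
        show ((pvAf d s).items).map (fun x => x.1) = (d.items).map (fun x => x.1)
        rw [hAitems, List.map_map]
        apply List.map_congr_left
        intro p hp
        by_cases hpk : p.1 == base
        · simp [Function.comp, (eq_of_beq hpk : p.1 = base)]
        · simp [Function.comp, hpk]
      rw [this]; exact hnd
  · -- fresh base
    have hgn : d.get? base = none := by
      rw [PySem.Dict.contains_eq_isSome_get?] at hc
      cases hdg : d.get? base with
      | none => rfl
      | some L => rw [hdg] at hc; simp at hc
    have hbc : (PySem.Dict.mk (d.items.map pvF) : PySem.Dict String String).contains base = false := by
      rw [PySem.Dict.contains_eq_isSome_get?, hget, hgn]; rfl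
    have hAitems : (pvAf d s).items = d.items ++ [(base, [s])] := by
      simp [pvAf, ← hbase, PySem.Dict.items_insert, hc, PySem.Dict.getD, hgn]
    refine ⟨?_, ?_, ?_⟩
    · simp only [pvBf, ← hbase, hget, hgn, Option.map_none]
      rw [PySem.Dict.items_insert, if_neg (by simp [hbc]), hAitems]
      simp [pvF, pvBest, PySem.List.max?]
    · intro p hp
      rw [hAitems] at hp
      rcases List.mem_append.mp hp with h1 | h1
      · exact hne _ h1
      · simp at h1; subst h1; simp
    · have hk : (pvAf d s).keys = d.keys ++ [base] := by
        show ((pvAf d s).items).map (fun x => x.1) = (d.items).map (fun x => x.1) ++ [base]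
        rw [hAitems, List.map_append]
        rfl
      have hbm : base ∉ d.keys := by
        rw [PySem.Dict.contains_eq_decide_mem_keys] at hc
        simpa using hc
      rw [hk]
      refine List.Nodup.append hnd (List.nodup_singleton _) ?_
      intro a ha hb
      simp only [List.mem_singleton] at hb
      subst hb
      exact hbm ha

lemma pv_fold_inv (ss : List String) (d : PySem.Dict String (List String))
    (b : PySem.Dict String String) (h : pvInv d b) :
    pvInv (ss.foldl pvAf d) (ss.foldl pvBf b) := by
  induction ss generalizing d b with
  | nil => exact h
  | cons s t ih => exact ih _ _ (pv_inv_step d b s h)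

lemma pv_foldl_append_map (l : List (String × List String)) (acc : List String) :
    l.foldl (fun sel p => sel ++ [(PySem.List.max? p.2 pyExtractVersion).getD ""]) acc
      = acc ++ l.map (fun p => pvBest p.2) := by
  induction l generalizing acc with
  | nil => simp
  | cons p t ih => simp [ih, pvBest]

-- ===== VERDICT (by name: the statement is the Claim_ definition above) =====
theorem deduplicate_services_spec : Claim_equal_deduplicate_services := by
  intro services _
  unfold Spec_deduplicate_services deduplicate_services deduplicate_services_alt
  have h0 : pvInv PySem.Dict.empty PySem.Dict.empty := by
    refine ⟨rfl, ?_, ?_⟩ <;> simp [PySem.Dict.empty, PySem.Dict.keys]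
  have h := pv_fold_inv services _ _ h0
  rw [pv_foldl_append_map]
  show [] ++ List.map (fun p => pvBest p.2) ((services.foldl pvAf PySem.Dict.empty).items)
      = (services.foldl pvBf PySem.Dict.empty).values
  rw [List.nil_append, PySem.Dict.values, h.1, List.map_map]
  apply List.map_congr_left
  intro p _
  simp [pvF]
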